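-- pv_equiv track=rewrite | github.com/Tulpana/ARC-AGI-2 | arc_agi_2_submission/ril/outline_ops.py | extract_outline
-- ===== SOURCE A (Python) =====
-- from typing import Dict, List, Optional, Set, Tuple
--
-- Grid = List[List[int]]
--
-- def extract_outline(grid: Grid, color: Optional[int] = None, thickness: int = 1) -> Grid:
--     """
--     Extract outline/boundary of filled regions.
--     If color specified: outline of that color only
--     If None: outline of all non-background regions
--     """
--     if not grid or not grid[0]:
--         return grid
--
--     h, w = len(grid), len(grid[0])
--     outline = [[0] * w for _ in range(h)]
--
--     for r in range(h):
--         for c in range(w):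
--             cell = grid[r][c]
--
--             # Skip if not target
--             if color is not None and cell != color:
--                 continue
--             if color is None and cell == 0:
--                 continue
--
--             # Check if on boundary
--             is_boundary = False
--
--             # Check all neighbors (4-connected)
--             for dr, dc in [(0, 1), (0, -1), (1, 0), (-1, 0)]:
--                 nr, nc = r + dr, c + dc
--
--                 # Edge of grid is boundary
--                 if nr < 0 or nr >= h or nc < 0 or nc >= w:
--                     is_boundary = True
--                     break
--
--                 neighbor_cell = grid[nr][nc]
--
--                 # Different color/background is boundary
--                 if neighbor_cell == 0:
--                     is_boundary = True
--                     break
--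
--                 if color is not None and neighbor_cell != color:
--                     is_boundary = True
--                     break
--
--             if is_boundary:
--                 outline[r][c] = cell
--
--     return outline
-- ===== SOURCE B (Python) =====
-- from typing import List, Optional
--
-- Grid = List[List[int]]
--
-- def extract_outline(grid: Grid, color: Optional[int] = None, thickness: int = 1) -> Grid:
--     """Shift-mask formulation: build a boolean target mask, AND it with its four
--     one-cell shifts (False-padded) to get the interior; a cell keeps its value
--     exactly when it is a target and not interior."""
--     if not grid or not grid[0]:
--         return grid
--
--     w = len(grid[0])
--     if color is None:
--         mask = [[cell != 0 for cell in row[:w]] for row in grid]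
--     else:
--         mask = [[cell == color for cell in row[:w]] for row in grid]
--
--     pad = [False] * w
--     out = []
--     for row, m, up, down in zip(grid, mask, [pad] + mask[:-1], mask[1:] + [pad]):
--         left = [False] + m[:-1]
--         right = m[1:] + [False]
--         out.append([v if t and not (l and rt and u and d) else 0
--                     for v, t, l, rt, u, d in zip(row, m, left, right, up, down)])
--     return out
-- ===== Notes on version B (the rewrite author's own statement) =====
-- stated objective: alternative
-- what changed: A classifies each cell by an inline early-exit scan of its four neighbour coordinates; B never inspects neighbour coordinates: it builds a boolean target mask once, forms the interior as the elementwise AND of the mask with its four one-cell shifts (False-padded rows/columns), and keeps a cell's value exactly when it is masked but not interior.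
import Mathlib
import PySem

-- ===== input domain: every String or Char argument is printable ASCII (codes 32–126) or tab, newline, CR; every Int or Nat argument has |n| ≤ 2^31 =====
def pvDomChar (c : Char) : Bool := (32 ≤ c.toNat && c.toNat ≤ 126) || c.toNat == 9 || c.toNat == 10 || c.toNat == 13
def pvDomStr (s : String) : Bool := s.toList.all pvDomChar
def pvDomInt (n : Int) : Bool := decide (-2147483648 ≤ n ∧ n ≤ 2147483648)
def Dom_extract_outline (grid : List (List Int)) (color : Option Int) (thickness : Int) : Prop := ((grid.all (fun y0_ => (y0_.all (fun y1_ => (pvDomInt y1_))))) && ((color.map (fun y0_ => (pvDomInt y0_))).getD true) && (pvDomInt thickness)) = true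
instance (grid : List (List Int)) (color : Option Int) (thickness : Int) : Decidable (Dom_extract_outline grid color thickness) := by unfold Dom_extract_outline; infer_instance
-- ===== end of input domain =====

-- B replaces A's per-cell neighbour scan by a mask-and-shift formulation (target mask ANDed with its four one-cell shifts gives the interior); alternative decomposition, same asymptotic cost.


-- grid[r][c] (total form; always used at in-range indices under Pre_)
def pvCell (grid : List (List Int)) (r c : Int) : Int :=
  PySem.List.pyGetD (PySem.List.pyGetD grid r []) c 0

-- the 4-neighbour delta list [(0,1),(0,-1),(1,0),(-1,0)] A writes literally
def pvDeltas : List (Int × Int) := [(0, 1), (0, -1), (1, 0), (-1, 0)]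

-- ===== PORT A =====
-- body of A's neighbour loop: true exactly when this neighbour triggers `is_boundary = True; break`
def pvNbrBad (grid : List (List Int)) (color : Option Int) (h w r c : Int) (d : Int × Int) : Bool :=
  let nr := r + d.1
  let nc := c + d.2
  if nr < 0 || h ≤ nr || nc < 0 || w ≤ nc then true
  else
    let ncell := pvCell grid nr nc
    if ncell == 0 then true
    else match color with
      | some col => ncell != col
      | none => false

def extract_outline (grid : List (List Int)) (color : Option Int) (thickness : Int) : List (List Int) :=
  if grid = [] ∨ grid.headD [] = [] then grid
  else
    let h : Int := grid.length
    let w : Int := (grid.headD []).length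
    let outline : List (List Int) :=
      List.replicate grid.length (List.replicate (grid.headD []).length (0 : Int))
    (PySem.List.pyRange 0 h 1).foldl (fun outline r =>
      (PySem.List.pyRange 0 w 1).foldl (fun outline c =>
        let cell := pvCell grid r c
        if (match color with | some col => cell != col | none => false) then outline
        else if color == none && cell == 0 then outline
        else if pvDeltas.any (pvNbrBad grid color h w r c) then
          PySem.List.pySetD outline r (PySem.List.pySetD (PySem.List.pyGetD outline r []) c cell)
        else outline) outline) outline

-- ===== PORT B =====
-- `cell` is a target cell (B's two mask comprehensions, one per branch of `color`)
def pvTarget (color : Option Int) (cell : Int) : Bool :=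
  match color with
  | none => cell != 0
  | some col => cell == col

-- B's inner comprehension over zip(row, m, left, right, up, down)
def pvZip6 : List Int → List Bool → List Bool → List Bool → List Bool → List Bool → List Int
  | v :: vs, t :: ts, l :: ls, rt :: rs, u :: us, d :: ds =>
      (if t && !(l && rt && u && d) then v else 0) :: pvZip6 vs ts ls rs us ds
  | _, _, _, _, _, _ => []

-- B's outer loop over zip(grid, mask, [pad]+mask[:-1], mask[1:]+[pad])
def pvRows : List (List Int) → List (List Bool) → List (List Bool) → List (List Bool) → List (List Int)
  | row :: gs, m :: ms, u :: us, d :: ds =>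
      pvZip6 row m (false :: m.dropLast) (m.drop 1 ++ [false]) u d :: pvRows gs ms us ds
  | _, _, _, _ => []

def extract_outline_alt (grid : List (List Int)) (color : Option Int) (thickness : Int) : List (List Int) :=
  if grid = [] ∨ grid.headD [] = [] then grid
  else
    let w := (grid.headD []).length
    let mask := grid.map (fun row => (row.take w).map (pvTarget color))
    let pad := List.replicate w false
    pvRows grid mask (pad :: mask.dropLast) (mask.drop 1 ++ [pad])

-- ===== PRECONDITION & SPEC =====
-- Pre_ excludes exactly the ragged grids (some row shorter than the first row), on which
-- Python A raises IndexError reading grid[r][c].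
def Pre_extract_outline (grid : List (List Int)) (color : Option Int) (thickness : Int) : Prop :=
  ∀ row ∈ grid, (grid.headD []).length ≤ row.length
instance (grid : List (List Int)) (color : Option Int) (thickness : Int) : Decidable (Pre_extract_outline grid color thickness) := by unfold Pre_extract_outline; infer_instance
def pvWitness_extract_outline : List (List Int) × Option Int × Int := ([[1, 1], [1, 0]], some 1, 1)

def Spec_extract_outline (grid : List (List Int)) (color : Option Int) (thickness : Int) (out : List (List Int)) : Prop := out = extract_outline_alt grid color thickness
instance (grid : List (List Int)) (color : Option Int) (thickness : Int) (out : List (List Int)) : Decidable (Spec_extract_outline grid color thickness out) := by unfold Spec_extract_outline; infer_instance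

-- ===== CLAIM (what is proved, stated in full; the proofs are below) =====
def Claim_equal_extract_outline : Prop := ∀ (grid : List (List Int)) (color : Option Int) (thickness : Int), Dom_extract_outline grid color thickness → Pre_extract_outline grid color thickness → Spec_extract_outline grid color thickness (extract_outline grid color thickness)

-- ===== LEMMAS AND PROOFS =====

-- mask value with False padding outside the h×w rectangle (proof-only abbreviation)
def pvM (grid : List (List Int)) (color : Option Int) (h w r c : Int) : Bool :=
  decide (0 ≤ r ∧ r < h ∧ 0 ≤ c ∧ c < w) && pvTarget color (pvCell grid r c)

-- length is preserved by A's row-updating fold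
lemma pv_fold_set_length (v : Nat → Int) (q : Nat → Bool) :
    ∀ (cs : List Nat) (row : List Int),
      (cs.foldl (fun row c => if q c then row.set c (v c) else row) row).length = row.length := by
  intro cs
  induction cs with
  | nil => intro row; rfl
  | cons c cs ih =>
    intro row
    rw [List.foldl_cons, ih]
    split_ifs <;> simp

-- pointwise description of A's row-updating fold
lemma pv_fold_set_getElem? (v : Nat → Int) (q : Nat → Bool) :
    ∀ (cs : List Nat) (row : List Int) (j : Nat),
      (cs.foldl (fun row c => if q c then row.set c (v c) else row) row)[j]? =
        if j ∈ cs ∧ q j then (if j < row.length then some (v j) else none) else row[j]? := by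
  intro cs
  induction cs with
  | nil => intro row j; simp
  | cons c cs ih =>
    intro row j
    rw [List.foldl_cons, ih]
    by_cases hqc : q c
    · simp only [hqc, if_true, List.length_set, List.getElem?_set, List.mem_cons]
      by_cases hjc : j = c
      · subst hjc
        by_cases hjcs : j ∈ cs <;> by_cases hqj : q j <;>
          simp_all
      · by_cases hjcs : j ∈ cs <;> by_cases hqj : q j <;>
          simp_all [Ne.symm hjc]
    · simp only [hqc, if_false, List.mem_cons]
      by_cases hjc : j = c
      · subst hjc; simp_all
      · simp_all

-- A's inner fold over one row commutes with extracting that row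
lemma pv_inner_commute (r : Nat) (v : Nat → Int) (q : Nat → Bool) :
    ∀ (cs : List Nat) (o : List (List Int)),
      cs.foldl (fun o c => if q c then o.set r ((o.getD r []).set c (v c)) else o) o =
        o.set r (cs.foldl (fun row c => if q c then row.set c (v c) else row) (o.getD r [])) := by
  intro cs
  induction cs with
  | nil =>
    intro o
    by_cases hr : r < o.length
    · rw [List.foldl_nil, List.getD_eq_getElem?_getD, List.getElem?_eq_getElem hr]
      simp [List.set_getElem_self]
    · rw [List.foldl_nil, List.set_eq_of_length_le (by omega)]
  | cons c cs ih =>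
    intro o
    by_cases hqc : q c
    · rw [List.foldl_cons, List.foldl_cons]
      simp only [hqc, if_true]
      rw [ih]
      by_cases hr : r < o.length
      · have hget : ((o.set r ((o.getD r []).set c (v c))).getD r []) = (o.getD r []).set c (v c) := by
          rw [List.getD_eq_getElem?_getD, List.getElem?_set]
          simp [hr]
        rw [hget, List.set_set]
      · have hset : ∀ X, o.set r X = o := fun X => List.set_eq_of_length_le (by omega)
        have hget : o.getD r [] = [] := by
          rw [List.getD_eq_getElem?_getD, List.getElem?_eq_none (by omega)]
          rfl
        simp only [hset, hget]
    · rw [List.foldl_cons, List.foldl_cons]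
      simp only [hqc, if_false]
      exact ih o

-- A's row fold on a fresh zero row yields the per-cell map
lemma pv_row_fold (w : Nat) (v : Nat → Int) (q : Nat → Bool) :
    (List.range w).foldl (fun row c => if q c then row.set c (v c) else row)
        (List.replicate w (0 : Int)) =
      (List.range w).map (fun c => if q c then v c else 0) := by
  apply List.ext_getElem?
  intro j
  rw [pv_fold_set_getElem?]
  by_cases hj : j < w
  · by_cases hqj : q j <;>
      simp [hj, hqj, List.getElem?_replicate, List.getElem?_map, List.getElem?_range hj]
  · simp [hj, List.getElem?_replicate, List.mem_range]

-- the row fold is idempotent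
lemma pv_row_fold_idem (v : Nat → Int) (q : Nat → Bool) (cs : List Nat) (row : List Int) :
    cs.foldl (fun row c => if q c then row.set c (v c) else row)
        (cs.foldl (fun row c => if q c then row.set c (v c) else row) row) =
      cs.foldl (fun row c => if q c then row.set c (v c) else row) row := by
  apply List.ext_getElem?
  intro j
  rw [pv_fold_set_getElem?, pv_fold_set_getElem?, pv_fold_set_length]
  by_cases hmem : j ∈ cs ∧ q j
  · simp [hmem]
  · simp [hmem]

-- pointwise description of A's outer fold over rows
lemma pv_outer_getElem? (G : Nat → List Int → List Int)
    (hG : ∀ r X, G r (G r X) = G r X) :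
    ∀ (rs : List Nat) (o : List (List Int)) (i : Nat),
      (rs.foldl (fun o r => o.set r (G r (o.getD r []))) o)[i]? =
        if i ∈ rs then (if i < o.length then some (G i (o.getD i [])) else none) else o[i]? := by
  intro rs
  induction rs with
  | nil => intro o i; simp
  | cons r rs ih =>
    intro o i
    rw [List.foldl_cons, ih]
    simp only [List.length_set, List.mem_cons]
    by_cases hir : i = r
    · subst hir
      by_cases hlen : i < o.length
      · have hget : ((o.set i (G i (o.getD i []))).getD i []) = G i (o.getD i []) := by
          rw [List.getD_eq_getElem?_getD, List.getElem?_set]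
          simp [hlen]
        by_cases hmem : i ∈ rs
        · simp [hmem, hlen, hget, hG]
        · simp [hmem, hlen, List.getElem?_set]
      · rw [List.set_eq_of_length_le (by omega)]
        have hnone : o[i]? = none := List.getElem?_eq_none (by omega)
        by_cases hmem : i ∈ rs <;> simp [hmem, hlen, hnone]
    · have hkey : (o.set r (G r (o[r]?.getD [])))[i]? = o[i]? := by
        rw [List.getElem?_set]; simp [Ne.symm hir]
      by_cases hmem : i ∈ rs <;>
        simp [hmem, hir, List.getD_eq_getElem?_getD, hkey]

-- A's three-way skip chain is `if target && boundary then write else skip`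
lemma pv_stepA_eq (color : Option Int) (cell : Int) (b : Bool) {α : Type} (o W : α) :
    (if (match color with | some col => cell != col | none => false) then o
     else if color == none && cell == 0 then o
     else if b then W else o) =
    if pvTarget color cell && b then W else o := by
  cases color with
  | none =>
    by_cases h0 : cell = 0
    · simp [pvTarget, h0]
    · cases b <;> simp [pvTarget, h0, bne_iff_ne]
  | some col =>
    by_cases h0 : cell = col
    · cases b <;> simp [pvTarget, h0]
    · simp [pvTarget, h0]

-- A equals the per-cell map form
lemma pv_A_eq_map (grid : List (List Int)) (color : Option Int) (thickness : Int)
    (hg : ¬(grid = [] ∨ grid.headD [] = [])) :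
    extract_outline grid color thickness =
      (PySem.List.pyRange 0 (grid.length : Int) 1).map (fun (r : Int) =>
        (PySem.List.pyRange 0 ((grid.headD []).length : Int) 1).map (fun (c : Int) =>
          if pvTarget color (pvCell grid r c) &&
             pvDeltas.any (pvNbrBad grid color (grid.length : Int) ((grid.headD []).length : Int) r c)
          then pvCell grid r c else 0)) := by
  have hconv :
      (PySem.List.pyRange 0 (grid.length : Int) 1).map (fun (r : Int) =>
        (PySem.List.pyRange 0 ((grid.headD []).length : Int) 1).map (fun (c : Int) =>
          if pvTarget color (pvCell grid r c) &&
             pvDeltas.any (pvNbrBad grid color (grid.length : Int) ((grid.headD []).length : Int) r c)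
          then pvCell grid r c else 0)) =
      (List.range grid.length).map (fun (r : Nat) =>
        (List.range (grid.headD []).length).map (fun (c : Nat) =>
          if pvTarget color (pvCell grid r c) &&
             pvDeltas.any (pvNbrBad grid color (grid.length : Int) ((grid.headD []).length : Int) (r : Int) (c : Int))
          then pvCell grid r c else 0)) := by
    simp only [PySem.List.pyRange_zero_nat, List.map_map]
    rfl
  rw [hconv]
  unfold extract_outline
  rw [if_neg hg]
  simp only [PySem.List.pyRange_zero_nat, List.foldl_map]
  have hstep :
      (fun (o : List (List Int)) (k : Nat) =>
        List.foldl (fun o (k2 : Nat) =>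
          let cell := pvCell grid (k : Int) (k2 : Int)
          if (match color with | some col => cell != col | none => false) then o
          else if color == none && cell == 0 then o
          else if pvDeltas.any (pvNbrBad grid color (grid.length : Int) ((grid.headD []).length : Int) (k : Int) (k2 : Int)) then
            PySem.List.pySetD o (k : Int) (PySem.List.pySetD (PySem.List.pyGetD o (k : Int) []) (k2 : Int) cell)
          else o) o (List.range (grid.headD []).length)) =
      (fun (o : List (List Int)) (r : Nat) =>
        o.set r ((List.range (grid.headD []).length).foldl
          (fun (row : List Int) (c : Nat) => if (pvTarget color (pvCell grid r c) &&
              pvDeltas.any (pvNbrBad grid color (grid.length : Int) ((grid.headD []).length : Int) (r : Int) (c : Int)))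
            then row.set c (pvCell grid r c) else row) (o.getD r []))) := by
    funext o r
    rw [← pv_inner_commute]
    apply PySem.List.foldl_congr_mem
    intro o' c _hc
    show _ = _
    simp only [pv_stepA_eq, PySem.List.pySetD_natCast, PySem.List.pyGetD_natCast]
  rw [hstep]
  apply List.ext_getElem?
  intro i
  rw [pv_outer_getElem?
    (fun r X => (List.range (grid.headD []).length).foldl
      (fun (row : List Int) (c : Nat) => if (pvTarget color (pvCell grid r c) &&
          pvDeltas.any (pvNbrBad grid color (grid.length : Int) ((grid.headD []).length : Int) (r : Int) (c : Int)))
        then row.set c (pvCell grid r c) else row) X)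
    (fun r X => pv_row_fold_idem _ _ _ X)]
  by_cases hi : i < grid.length
  · have hrep : (List.replicate grid.length (List.replicate (grid.headD []).length (0:Int))).getD i [] =
        List.replicate (grid.headD []).length (0:Int) := by
      rw [List.getD_eq_getElem?_getD, List.getElem?_replicate]
      simp [hi]
    simp only [List.mem_range, hi, if_true, List.length_replicate, hrep, pv_row_fold]
    rw [List.getElem?_map, List.getElem?_range hi]
    rfl
  · simp [List.mem_range, hi, List.getElem?_replicate, List.getElem?_map,
      List.getElem?_eq_none (le_of_not_gt (by simpa using hi))]

-- one neighbour: A's "bad" test is the negation of the padded mask at the neighbour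
lemma pv_bad_iff (grid : List (List Int)) (color : Option Int) (h w r c : Int) (d : Int × Int)
    (hcol : color = none ∨ ∃ col, color = some col ∧ col ≠ 0) :
    pvNbrBad grid color h w r c d = !(pvM grid color h w (r + d.1) (c + d.2)) := by
  unfold pvNbrBad pvM
  by_cases hin : r + d.1 < 0 ∨ h ≤ r + d.1 ∨ c + d.2 < 0 ∨ w ≤ c + d.2
  · have h1 : (r + d.1 < 0 || h ≤ r + d.1 || (c + d.2 < 0) || (w ≤ c + d.2)) = true := by
      simp only [Bool.or_eq_true, decide_eq_true_iff]; tauto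
    have h2 : decide (0 ≤ r + d.1 ∧ r + d.1 < h ∧ 0 ≤ c + d.2 ∧ c + d.2 < w) = false := by
      simp only [decide_eq_false_iff_not]; omega
    simp [h1, h2]
  · push_neg at hin
    have h1 : (r + d.1 < 0 || h ≤ r + d.1 || (c + d.2 < 0) || (w ≤ c + d.2)) = false := by
      simp only [Bool.or_eq_false_iff, decide_eq_false_iff_not]; omega
    have h2 : decide (0 ≤ r + d.1 ∧ r + d.1 < h ∧ 0 ≤ c + d.2 ∧ c + d.2 < w) = true := by
      simp only [decide_eq_true_iff]; omega
    simp only [h1, if_false, h2, Bool.true_and]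
    rcases hcol with rfl | ⟨col, rfl, hcol0⟩
    · by_cases h0 : pvCell grid (r + d.1) (c + d.2) = 0 <;> simp [pvTarget, h0]
    · by_cases h0 : pvCell grid (r + d.1) (c + d.2) = col
      · have : pvCell grid (r + d.1) (c + d.2) ≠ 0 := h0 ▸ hcol0
        simp [pvTarget, h0, this, hcol0]
      · by_cases hz : pvCell grid (r + d.1) (c + d.2) = 0 <;> simp [pvTarget, h0, hz, hcol0, Ne.symm hcol0, bne]

-- pointwise description of B's six-way zip comprehension
lemma pvZip6_getElem? :
    ∀ (vs : List Int) (ts ls rs us ds : List Bool) (j : Nat),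
      (pvZip6 vs ts ls rs us ds)[j]? =
        match vs[j]?, ts[j]?, ls[j]?, rs[j]?, us[j]?, ds[j]? with
        | some v, some t, some l, some rt, some u, some d =>
            some (if t && !(l && rt && u && d) then v else 0)
        | _, _, _, _, _, _ => none := by
  intro vs
  induction vs with
  | nil => intro ts ls rs us ds j; simp [pvZip6]
  | cons v vs ih =>
    intro ts ls rs us ds j
    cases ts with
    | nil => simp [pvZip6]
    | cons t ts =>
      cases ls with
      | nil => simp [pvZip6]
      | cons l ls =>
        cases rs with
        | nil => simp [pvZip6]
        | cons rt rs =>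
          cases us with
          | nil => simp [pvZip6]
          | cons u us =>
            cases ds with
            | nil => simp [pvZip6]
            | cons d ds =>
              cases j with
              | zero => simp [pvZip6]
              | succ j => simpa [pvZip6] using ih ts ls rs us ds j

-- pointwise description of B's outer four-way zip loop
lemma pvRows_getElem? :
    ∀ (gs : List (List Int)) (ms us ds : List (List Bool)) (i : Nat),
      (pvRows gs ms us ds)[i]? =
        match gs[i]?, ms[i]?, us[i]?, ds[i]? with
        | some row, some m, some u, some d =>
            some (pvZip6 row m (false :: m.dropLast) (m.drop 1 ++ [false]) u d)
        | _, _, _, _ => none := by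
  intro gs
  induction gs with
  | nil => intro ms us ds i; simp [pvRows]
  | cons row gs ih =>
    intro ms us ds i
    cases ms with
    | nil => simp [pvRows]
    | cons m ms =>
      cases us with
      | nil => simp [pvRows]
      | cons u us =>
        cases ds with
        | nil => simp [pvRows]
        | cons d ds =>
          cases i with
          | zero => simp [pvRows]
          | succ i => simpa [pvRows] using ih ms us ds i

-- the padded mask at an in-range coordinate
lemma pvM_in (grid : List (List Int)) (color : Option Int) (i j : Nat)
    (hi : i < grid.length) (hj : j < (grid.headD []).length) :
    pvM grid color (grid.length : Int) ((grid.headD []).length : Int) (i : Int) (j : Int) =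
      pvTarget color (pvCell grid (i : Int) (j : Int)) := by
  unfold pvM
  have : decide ((0:Int) ≤ (i:Int) ∧ (i:Int) < (grid.length : Int) ∧ (0:Int) ≤ (j:Int) ∧ (j:Int) < ((grid.headD []).length : Int)) = true := by
    simp only [decide_eq_true_iff]
    constructor
    · exact Int.natCast_nonneg i
    refine ⟨by exact_mod_cast hi, Int.natCast_nonneg j, by exact_mod_cast hj⟩
  rw [this, Bool.true_and]

-- the cell value at an in-range coordinate under Pre_
lemma pv_cell_in (grid : List (List Int)) (i j : Nat)
    (hi : i < grid.length) (hj : j < grid[i].length) :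
    pvCell grid (i : Int) (j : Int) = grid[i][j] := by
  unfold pvCell
  rw [PySem.List.pyGetD_natCast, PySem.List.pyGetD_natCast,
    List.getD_eq_getElem _ _ hi, List.getD_eq_getElem _ _ hj]

-- the padded mask is false outside the rectangle
lemma pvM_out (grid : List (List Int)) (color : Option Int) (h w r c : Int)
    (hout : r < 0 ∨ h ≤ r ∨ c < 0 ∨ w ≤ c) : pvM grid color h w r c = false := by
  unfold pvM
  have : decide (0 ≤ r ∧ r < h ∧ 0 ≤ c ∧ c < w) = false := by
    simp only [decide_eq_false_iff_not]; omega
  simp [this]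

-- one mask row, read through the padded mask
lemma pv_maskrow_get (grid : List (List Int)) (color : Option Int) (H W k j : Nat)
    (hk : k < H) (hkG : k < grid.length) (hrow : W ≤ grid[k].length) (hj : j < W) :
    ((grid[k].take W).map (pvTarget color))[j]? =
      some (pvM grid color (H : Int) (W : Int) (k : Int) (j : Int)) := by
  have hjr : j < grid[k].length := lt_of_lt_of_le hj hrow
  rw [List.getElem?_map, List.getElem?_take, if_pos hj, List.getElem?_eq_getElem hjr]
  have hMk : pvM grid color (H : Int) (W : Int) (k : Int) (j : Int) =
      pvTarget color (pvCell grid (k : Int) (j : Int)) := by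
    unfold pvM
    have : decide ((0:Int) ≤ (k:Int) ∧ (k:Int) < (H:Int) ∧ (0:Int) ≤ (j:Int) ∧ (j:Int) < (W:Int)) = true := by
      simp only [decide_eq_true_iff]
      refine ⟨Int.natCast_nonneg k, by exact_mod_cast hk, Int.natCast_nonneg j, by exact_mod_cast hj⟩
    rw [this, Bool.true_and]
  rw [hMk, pv_cell_in grid k j hkG hjr]
  rfl

-- one row of B, described against the padded mask
lemma pv_row_eq (grid : List (List Int)) (color : Option Int) (H W : Nat) (i : Nat)
    (hi : i < H) (hiG : i < grid.length) (hrow : W ≤ grid[i].length)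
    (U D : List Bool)
    (hU : ∀ j : Nat, j < W → U[j]? = some (pvM grid color (H : Int) (W : Int) ((i : Int) - 1) (j : Int)))
    (hD : ∀ j : Nat, j < W → D[j]? = some (pvM grid color (H : Int) (W : Int) ((i : Int) + 1) (j : Int))) :
    pvZip6 grid[i] ((grid[i].take W).map (pvTarget color))
      (false :: ((grid[i].take W).map (pvTarget color)).dropLast)
      (((grid[i].take W).map (pvTarget color)).drop 1 ++ [false]) U D =
    (List.range W).map (fun (c : Nat) =>
      if pvM grid color (H : Int) (W : Int) (i : Int) (c : Int) &&
         !(pvM grid color (H : Int) (W : Int) (i : Int) ((c : Int) - 1) &&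
           pvM grid color (H : Int) (W : Int) (i : Int) ((c : Int) + 1) &&
           pvM grid color (H : Int) (W : Int) ((i : Int) - 1) (c : Int) &&
           pvM grid color (H : Int) (W : Int) ((i : Int) + 1) (c : Int))
      then pvCell grid (i : Int) (c : Int) else 0) := by
  have hmlen : (((grid[i].take W).map (pvTarget color)) : List Bool).length = W := by
    simp [List.length_take]; omega
  have hmj : ∀ k : Nat, k < W →
      (((grid[i].take W).map (pvTarget color)) : List Bool)[k]? =
        some (pvM grid color (H : Int) (W : Int) (i : Int) (k : Int)) := by
    intro k hk
    have hkr : k < grid[i].length := lt_of_lt_of_le hk hrow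
    rw [List.getElem?_map, List.getElem?_take, if_pos hk, List.getElem?_eq_getElem hkr]
    have hMk : pvM grid color (H : Int) (W : Int) (i : Int) (k : Int) =
        pvTarget color (pvCell grid (i : Int) (k : Int)) := by
      unfold pvM
      have : decide ((0:Int) ≤ (i:Int) ∧ (i:Int) < (H:Int) ∧ (0:Int) ≤ (k:Int) ∧ (k:Int) < (W:Int)) = true := by
        simp only [decide_eq_true_iff]
        refine ⟨Int.natCast_nonneg i, by exact_mod_cast hi, Int.natCast_nonneg k, by exact_mod_cast hk⟩
      rw [this, Bool.true_and]
    rw [hMk, pv_cell_in grid i k hiG hkr]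
    rfl
  apply List.ext_getElem?
  intro j
  rw [pvZip6_getElem?]
  by_cases hj : j < W
  · have hrhs : ((List.range W).map (fun (c : Nat) =>
        if pvM grid color (H : Int) (W : Int) (i : Int) (c : Int) &&
           !(pvM grid color (H : Int) (W : Int) (i : Int) ((c : Int) - 1) &&
             pvM grid color (H : Int) (W : Int) (i : Int) ((c : Int) + 1) &&
             pvM grid color (H : Int) (W : Int) ((i : Int) - 1) (c : Int) &&
             pvM grid color (H : Int) (W : Int) ((i : Int) + 1) (c : Int))
        then pvCell grid (i : Int) (c : Int) else 0))[j]? =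
        some (if pvM grid color (H : Int) (W : Int) (i : Int) (j : Int) &&
           !(pvM grid color (H : Int) (W : Int) (i : Int) ((j : Int) - 1) &&
             pvM grid color (H : Int) (W : Int) (i : Int) ((j : Int) + 1) &&
             pvM grid color (H : Int) (W : Int) ((i : Int) - 1) (j : Int) &&
             pvM grid color (H : Int) (W : Int) ((i : Int) + 1) (j : Int))
        then pvCell grid (i : Int) (j : Int) else 0) := by
      rw [List.getElem?_map, List.getElem?_range hj]
      rfl
    rw [hrhs]
    have hjr : j < grid[i].length := lt_of_lt_of_le hj hrow
    rw [List.getElem?_eq_getElem hjr, hmj j hj, hU j hj, hD j hj]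
    -- left shift
    have hl : ((false :: ((grid[i].take W).map (pvTarget color)).dropLast) : List Bool)[j]? =
        some (pvM grid color (H : Int) (W : Int) (i : Int) ((j : Int) - 1)) := by
      cases j with
      | zero =>
        rw [pvM_out grid color _ _ _ _ (by right; right; left; omega)]
        rfl
      | succ k =>
        have hkW : k < W - 1 := by omega
        show ((((grid[i].take W).map (pvTarget color)) : List Bool).dropLast)[k]? = _
        rw [List.getElem?_dropLast, if_pos (by omega), hmj k (by omega)]
        congr 2
        push_cast; ring
    -- right shift
    have hr : ((((grid[i].take W).map (pvTarget color)).drop 1 ++ [false]) : List Bool)[j]? =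
        some (pvM grid color (H : Int) (W : Int) (i : Int) ((j : Int) + 1)) := by
      by_cases hjW : j < W - 1
      · rw [List.getElem?_append_left (by simp [hmlen]; omega), List.getElem?_drop, hmj (1 + j) (by omega)]
        congr 2
        push_cast; ring
      · have hjeq : j = W - 1 := by omega
        rw [List.getElem?_append_right (by simp [hmlen]; omega)]
        have : j - (((grid[i].take W).map (pvTarget color)).drop 1).length = 0 := by
          simp [hmlen]; omega
        rw [this, pvM_out grid color _ _ _ _ (by right; right; right; omega)]
        rfl
    rw [hl, hr]
    show some _ = some _
    congr 1
    rw [pv_cell_in grid i j hiG hjr]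
  · have hmnone : (((grid[i].take W).map (pvTarget color)) : List Bool)[j]? = none :=
      List.getElem?_eq_none (by rw [hmlen]; omega)
    have hrhs : ((List.range W).map (fun (c : Nat) =>
        if pvM grid color (H : Int) (W : Int) (i : Int) (c : Int) &&
           !(pvM grid color (H : Int) (W : Int) (i : Int) ((c : Int) - 1) &&
             pvM grid color (H : Int) (W : Int) (i : Int) ((c : Int) + 1) &&
             pvM grid color (H : Int) (W : Int) ((i : Int) - 1) (c : Int) &&
             pvM grid color (H : Int) (W : Int) ((i : Int) + 1) (c : Int))
        then pvCell grid (i : Int) (c : Int) else 0))[j]? = none :=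
      List.getElem?_eq_none (by simp; omega)
    rw [hmnone, hrhs]
    cases h : grid[i][j]? <;> rfl

-- B equals the per-cell padded-mask map form
lemma pv_B_eq_map (grid : List (List Int)) (color : Option Int) (thickness : Int)
    (hg : ¬(grid = [] ∨ grid.headD [] = []))
    (hpre : ∀ row ∈ grid, (grid.headD []).length ≤ row.length) :
    extract_outline_alt grid color thickness =
      (List.range grid.length).map (fun (r : Nat) =>
        (List.range (grid.headD []).length).map (fun (c : Nat) =>
          if pvM grid color (grid.length : Int) ((grid.headD []).length : Int) r c &&
             !(pvM grid color (grid.length : Int) ((grid.headD []).length : Int) r ((c : Int) - 1) &&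
               pvM grid color (grid.length : Int) ((grid.headD []).length : Int) r ((c : Int) + 1) &&
               pvM grid color (grid.length : Int) ((grid.headD []).length : Int) ((r : Int) - 1) c &&
               pvM grid color (grid.length : Int) ((grid.headD []).length : Int) ((r : Int) + 1) c)
          then pvCell grid r c else 0)) := by
  have hH1 : 1 ≤ grid.length := by
    cases grid with
    | nil => exact absurd (Or.inl rfl) hg
    | cons a l => simp
  have hB : extract_outline_alt grid color thickness =
      pvRows grid (grid.map (fun row => (row.take (grid.headD []).length).map (pvTarget color)))
        (List.replicate (grid.headD []).length false ::
          (grid.map (fun row => (row.take (grid.headD []).length).map (pvTarget color))).dropLast)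
        ((grid.map (fun row => (row.take (grid.headD []).length).map (pvTarget color))).drop 1 ++
          [List.replicate (grid.headD []).length false]) := by
    unfold extract_outline_alt
    rw [if_neg hg]
  rw [hB]
  apply List.ext_getElem?
  intro i
  rw [pvRows_getElem?]
  by_cases hi : i < grid.length
  · have hgi : grid[i]? = some grid[i] := List.getElem?_eq_getElem hi
    have hMi : (grid.map (fun row => (row.take (grid.headD []).length).map (pvTarget color)))[i]? =
        some ((grid[i].take (grid.headD []).length).map (pvTarget color)) := by
      rw [List.getElem?_map, hgi]; rfl
    have hrow : (grid.headD []).length ≤ grid[i].length := hpre _ (List.getElem_mem hi)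
    have hrhs : ((List.range grid.length).map (fun (r : Nat) =>
        (List.range (grid.headD []).length).map (fun (c : Nat) =>
          if pvM grid color (grid.length : Int) ((grid.headD []).length : Int) r c &&
             !(pvM grid color (grid.length : Int) ((grid.headD []).length : Int) r ((c : Int) - 1) &&
               pvM grid color (grid.length : Int) ((grid.headD []).length : Int) r ((c : Int) + 1) &&
               pvM grid color (grid.length : Int) ((grid.headD []).length : Int) ((r : Int) - 1) c &&
               pvM grid color (grid.length : Int) ((grid.headD []).length : Int) ((r : Int) + 1) c)
          then pvCell grid r c else 0)))[i]? =
        some ((List.range (grid.headD []).length).map (fun (c : Nat) =>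
          if pvM grid color (grid.length : Int) ((grid.headD []).length : Int) i c &&
             !(pvM grid color (grid.length : Int) ((grid.headD []).length : Int) i ((c : Int) - 1) &&
               pvM grid color (grid.length : Int) ((grid.headD []).length : Int) i ((c : Int) + 1) &&
               pvM grid color (grid.length : Int) ((grid.headD []).length : Int) ((i : Int) - 1) c &&
               pvM grid color (grid.length : Int) ((grid.headD []).length : Int) ((i : Int) + 1) c)
          then pvCell grid i c else 0)) := by
      rw [List.getElem?_map, List.getElem?_range hi]
      rfl
    rw [hrhs]
    -- up row
    obtain ⟨U, hUi, hU⟩ : ∃ U : List Bool,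
        (List.replicate (grid.headD []).length false ::
          (grid.map (fun row => (row.take (grid.headD []).length).map (pvTarget color))).dropLast)[i]? = some U ∧
        ∀ j : Nat, j < (grid.headD []).length →
          U[j]? = some (pvM grid color (grid.length : Int) ((grid.headD []).length : Int) ((i : Int) - 1) (j : Int)) := by
      cases i with
      | zero =>
        refine ⟨List.replicate (grid.headD []).length false, rfl, ?_⟩
        intro j hj
        rw [List.getElem?_replicate, if_pos hj,
          pvM_out grid color _ _ _ _ (by left; omega)]
      | succ k =>
        have hk : k < grid.length := by omega
        refine ⟨(grid[k].take (grid.headD []).length).map (pvTarget color), ?_, ?_⟩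
        · show ((grid.map (fun row => (row.take (grid.headD []).length).map (pvTarget color))).dropLast)[k]? = _
          rw [List.getElem?_dropLast, if_pos (by simp; omega), List.getElem?_map,
            List.getElem?_eq_getElem hk]
          rfl
        · intro j hj
          rw [pv_maskrow_get grid color grid.length (grid.headD []).length k j hk hk
            (hpre _ (List.getElem_mem hk)) hj]
          congr 2
          push_cast; ring
    -- down row
    obtain ⟨D, hDi, hD⟩ : ∃ D : List Bool,
        ((grid.map (fun row => (row.take (grid.headD []).length).map (pvTarget color))).drop 1 ++
          [List.replicate (grid.headD []).length false])[i]? = some D ∧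
        ∀ j : Nat, j < (grid.headD []).length →
          D[j]? = some (pvM grid color (grid.length : Int) ((grid.headD []).length : Int) ((i : Int) + 1) (j : Int)) := by
      by_cases hilast : i < grid.length - 1
      · have hik : 1 + i < grid.length := by omega
        refine ⟨(grid[1 + i].take (grid.headD []).length).map (pvTarget color), ?_, ?_⟩
        · rw [List.getElem?_append_left (by simp; omega), List.getElem?_drop, List.getElem?_map,
            List.getElem?_eq_getElem hik]
          rfl
        · intro j hj
          rw [pv_maskrow_get grid color grid.length (grid.headD []).length (1 + i) j hik hik
            (hpre _ (List.getElem_mem hik)) hj]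
          congr 2
          push_cast; ring
      · have hieq : i = grid.length - 1 := by omega
        refine ⟨List.replicate (grid.headD []).length false, ?_, ?_⟩
        · rw [List.getElem?_append_right (by simp; omega)]
          have : i - ((grid.map (fun row => (row.take (grid.headD []).length).map (pvTarget color))).drop 1).length = 0 := by
            simp; omega
          rw [this]
          rfl
        · intro j hj
          rw [List.getElem?_replicate, if_pos hj,
            pvM_out grid color _ _ _ _ (by right; left; omega)]
    rw [hgi, hMi, hUi, hDi]
    show some _ = some _
    congr 1
    rw [pv_row_eq grid color grid.length (grid.headD []).length i hi hi hrow U D hU hD]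
  · have h1 : grid[i]? = none := List.getElem?_eq_none (by omega)
    have h2 : (grid.map (fun row => (row.take (grid.headD []).length).map (pvTarget color)))[i]? =
        (none : Option (List Bool)) := List.getElem?_eq_none (by simp; omega)
    have h3 : (List.replicate (grid.headD []).length false ::
          (grid.map (fun row => (row.take (grid.headD []).length).map (pvTarget color))).dropLast)[i]? =
        (none : Option (List Bool)) := List.getElem?_eq_none (by simp; omega)
    have h4 : ((grid.map (fun row => (row.take (grid.headD []).length).map (pvTarget color))).drop 1 ++
          [List.replicate (grid.headD []).length false])[i]? =
        (none : Option (List Bool)) := List.getElem?_eq_none (by simp; omega)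
    rw [h1, h2, h3, h4, List.getElem?_eq_none (by simp; omega)]

-- ===== VERDICT (by name: the statement is the Claim_ definition above) =====
theorem extract_outline_spec : Claim_equal_extract_outline := by
  intro grid color thickness _hdom hpre
  unfold Spec_extract_outline
  by_cases hg : grid = [] ∨ grid.headD [] = []
  · unfold extract_outline extract_outline_alt
    rw [if_pos hg, if_pos hg]
  · rw [pv_A_eq_map grid color thickness hg, pv_B_eq_map grid color thickness hg hpre]
    simp only [PySem.List.pyRange_zero_nat, List.map_map]
    apply List.map_congr_left
    intro r hr
    apply List.map_congr_left
    intro c hc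
    rw [List.mem_range] at hr hc
    show (if pvTarget color (pvCell grid r c) && _ then _ else _) = _
    by_cases ht : pvTarget color (pvCell grid (r:Int) (c:Int)) = true
    swap
    · have hM : pvM grid color (grid.length : Int) ((grid.headD []).length : Int) (r:Int) (c:Int) = false := by
        rw [pvM_in grid color r c hr hc]
        exact Bool.eq_false_iff.mpr ht
      rw [hM]
      simp [Bool.eq_false_iff.mpr ht]
    · by_cases hc0 : color = some 0
      · -- outline of color 0: every written value is 0, both sides are 0
        subst hc0
        have hcell0 : pvCell grid (r:Int) (c:Int) = 0 := by
          simpa [pvTarget] using ht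
        rw [hcell0]
        split_ifs <;> rfl
      · have hcol : color = none ∨ ∃ col, color = some col ∧ col ≠ 0 := by
          cases color with
          | none => exact Or.inl rfl
          | some col =>
            refine Or.inr ⟨col, rfl, ?_⟩
            intro h0; exact hc0 (by rw [h0])
        have hM : pvM grid color (grid.length : Int) ((grid.headD []).length : Int) (r:Int) (c:Int) = true := by
          rw [pvM_in grid color r c hr hc]; exact ht
        have hany : pvDeltas.any (pvNbrBad grid color (grid.length : Int) ((grid.headD []).length : Int) (r:Int) (c:Int)) =
            !(pvM grid color (grid.length : Int) ((grid.headD []).length : Int) (r:Int) ((c:Int) - 1) &&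
              pvM grid color (grid.length : Int) ((grid.headD []).length : Int) (r:Int) ((c:Int) + 1) &&
              pvM grid color (grid.length : Int) ((grid.headD []).length : Int) ((r:Int) - 1) (c:Int) &&
              pvM grid color (grid.length : Int) ((grid.headD []).length : Int) ((r:Int) + 1) (c:Int)) := by
        -- expand the four-element any and the four bad tests
          have e1 : (c:Int) - 1 = (c:Int) + -1 := by ring
          have e2 : (r:Int) - 1 = (r:Int) + -1 := by ring
          rw [e1, e2]
          simp only [pvDeltas, List.any_cons, List.any_nil,
            pv_bad_iff grid color _ _ _ _ _ hcol, Bool.or_false, Int.add_zero]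
          generalize pvM grid color (grid.length : Int) ((grid.headD []).length : Int) (r:Int) ((c:Int) + 1) = b1
          generalize pvM grid color (grid.length : Int) ((grid.headD []).length : Int) (r:Int) ((c:Int) + -1) = b2
          generalize pvM grid color (grid.length : Int) ((grid.headD []).length : Int) ((r:Int) + 1) (c:Int) = b3
          generalize pvM grid color (grid.length : Int) ((grid.headD []).length : Int) ((r:Int) + -1) (c:Int) = b4
          cases b1 <;> cases b2 <;> cases b3 <;> cases b4 <;> decide
        rw [hany, hM, ht]
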